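-- pv_equiv track=rewrite | github.com/Floorp-Projects/Floorp | dom/media/webrtc/third_party_build/extract-for-git.py | filter_nonwebrtc
-- ===== SOURCE A (Python) =====
-- LIBWEBRTC_DIR = "third_party/libwebrtc"
--
-- def filter_nonwebrtc(commit):
--     filtered = []
--     skipping = False
--     for line in commit.split("\n"):
--         # Extract only patches affecting libwebrtc, but avoid commits that
--         # touch build, which is tracked by a separate repo, or that affect
--         # moz.build files which are code generated.
--         if (
--             line.startswith("diff --git a/" + LIBWEBRTC_DIR)
--             and not line.startswith("diff --git a/" + LIBWEBRTC_DIR + "/build")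
--             and not line.startswith("diff --git a/" + LIBWEBRTC_DIR + "/third_party")
--             and not line.endswith("moz.build")
--         ):
--             skipping = False
--         elif line.startswith("diff --git"):
--             skipping = True
--
--         if not skipping:
--             filtered.append(line)
--     return "\n".join(filtered)
-- ===== SOURCE B (Python) =====
-- LIBWEBRTC_DIR = "third_party/libwebrtc"
--
--
-- def _keep_header(line):
--     return (
--         line.startswith("diff --git a/" + LIBWEBRTC_DIR)
--         and not line.startswith("diff --git a/" + LIBWEBRTC_DIR + "/build")
--         and not line.startswith("diff --git a/" + LIBWEBRTC_DIR + "/third_party")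
--         and not line.endswith("moz.build")
--     )
--
--
-- def filter_nonwebrtc(commit):
--     # Group the diff into sections: a preamble (lines before the first
--     # "diff --git" header) and one section per header; keep the preamble
--     # and every section whose header affects libwebrtc proper.
--     sections = [[]]
--     for line in commit.split("\n"):
--         if line.startswith("diff --git"):
--             sections.append([line])
--         else:
--             sections[-1].append(line)
--     kept = sections[:1] + [s for s in sections[1:] if _keep_header(s[0])]
--     return "\n".join(line for s in kept for line in s)
-- ===== Notes on version B (the rewrite author's own statement) =====
-- stated objective: simpler
-- what changed: A's stateful line scan with a persistent skip flag is replaced by grouping the diff into sections at each diff header line, keeping the preamble and filtering the sections by a predicate on their header, then flattening.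
import Mathlib
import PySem

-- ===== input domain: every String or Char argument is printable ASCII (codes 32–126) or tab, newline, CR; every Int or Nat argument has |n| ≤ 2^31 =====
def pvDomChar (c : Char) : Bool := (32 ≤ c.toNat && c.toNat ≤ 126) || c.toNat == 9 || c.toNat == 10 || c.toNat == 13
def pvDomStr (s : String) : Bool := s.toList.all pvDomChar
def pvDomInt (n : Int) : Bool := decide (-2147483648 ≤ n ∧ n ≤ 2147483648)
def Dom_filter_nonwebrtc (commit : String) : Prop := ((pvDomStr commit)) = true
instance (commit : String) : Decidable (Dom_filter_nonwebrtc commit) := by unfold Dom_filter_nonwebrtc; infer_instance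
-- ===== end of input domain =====

-- B restructures A's flag-driven line scan as: group the diff into sections at each
-- "diff --git" header, keep the preamble and the sections whose header affects
-- libwebrtc proper, and rejoin — objective: simpler (same O(n) cost).

-- ===== PORT A =====
-- literal port of A; the constant concatenations "diff --git a/" + LIBWEBRTC_DIR (+ suffix)
-- are written as the folded string literals
def filter_nonwebrtc (commit : String) : String :=
  let r := ((PySem.Str.split? commit "\n").getD []).foldl
    (fun (st : List String × Bool) line =>
      let skipping :=
        if PySem.Str.startswith line "diff --git a/third_party/libwebrtc"
            && !(PySem.Str.startswith line "diff --git a/third_party/libwebrtc/build")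
            && !(PySem.Str.startswith line "diff --git a/third_party/libwebrtc/third_party")
            && !(PySem.Str.endswith line "moz.build") then false
        else if PySem.Str.startswith line "diff --git" then true
        else st.2
      (if !skipping then st.1 ++ [line] else st.1, skipping))
    ([], false)
  PySem.Str.join "\n" r.1

-- ===== PORT B =====
def pvKeepHeader (line : String) : Bool :=
  PySem.Str.startswith line "diff --git a/third_party/libwebrtc"
    && !(PySem.Str.startswith line "diff --git a/third_party/libwebrtc/build")
    && !(PySem.Str.startswith line "diff --git a/third_party/libwebrtc/third_party")
    && !(PySem.Str.endswith line "moz.build")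

def filter_nonwebrtc_alt (commit : String) : String :=
  let st := ((PySem.Str.split? commit "\n").getD []).foldl
    (fun (st : List (List String) × List String) line =>
      if PySem.Str.startswith line "diff --git" then (st.1 ++ [st.2], [line])
      else (st.1, st.2 ++ [line]))
    ([], [])
  let sections := st.1 ++ [st.2]
  let kept := sections.take 1 ++
    (sections.drop 1).filter (fun s => match s with | h :: _ => pvKeepHeader h | [] => false)
  PySem.Str.join "\n" kept.flatten

-- ===== PRECONDITION & SPEC =====
def Spec_filter_nonwebrtc (commit : String) (out : String) : Prop := out = filter_nonwebrtc_alt commit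
instance (commit : String) (out : String) : Decidable (Spec_filter_nonwebrtc commit out) := by unfold Spec_filter_nonwebrtc; infer_instance

-- ===== CLAIM (what is proved, stated in full; the proofs are below) =====
def Claim_equal_filter_nonwebrtc : Prop := ∀ (commit : String), Dom_filter_nonwebrtc commit → Spec_filter_nonwebrtc commit (filter_nonwebrtc commit)

-- ===== LEMMAS AND PROOFS =====

def pvIsHdr (line : String) : Bool := PySem.Str.startswith line "diff --git"

-- A's loop step, written with the named predicates (definitionally equal to the port's lambda)
def pvStepA (st : List String × Bool) (line : String) : List String × Bool :=
  let skipping := if pvKeepHeader line then false else if pvIsHdr line then true else st.2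
  (if !skipping then st.1 ++ [line] else st.1, skipping)

-- B's loop step, likewise
def pvStepB (st : List (List String) × List String) (line : String) :
    List (List String) × List String :=
  if pvIsHdr line then (st.1 ++ [st.2], [line]) else (st.1, st.2 ++ [line])

-- proof-side view of A's loop: the lines A still emits from state `s`
def pvRunA (ls : List String) (s : Bool) : List String :=
  match ls with
  | [] => []
  | l :: ls =>
    let s' := if pvKeepHeader l then false else if pvIsHdr l then true else s
    (if s' then [] else [l]) ++ pvRunA ls s'

-- proof-side view of B's grouping: (preamble, header-led sections)
def pvSecs (ls : List String) : List String × List (List String) :=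
  match ls with
  | [] => ([], [])
  | l :: ls =>
    let p := pvSecs ls
    if pvIsHdr l then ([], (l :: p.1) :: p.2) else (l :: p.1, p.2)

def pvKeepSec (s : List String) : Bool := match s with | h :: _ => pvKeepHeader h | [] => false

lemma pvKeep_imp_header (l : String) (h : pvKeepHeader l = true) : pvIsHdr l = true := by
  unfold pvKeepHeader at h
  rw [Bool.and_eq_true, Bool.and_eq_true, Bool.and_eq_true] at h
  obtain ⟨⟨⟨h1, -⟩, -⟩, -⟩ := h
  unfold pvIsHdr
  simp only [PySem.Str.startswith_eq] at h1 ⊢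
  rw [PySem.Chars.startswith_iff] at h1 ⊢
  exact List.IsPrefix.trans (by decide) h1

lemma pvFoldA (ls : List String) (acc : List String) (s : Bool) :
    (ls.foldl pvStepA (acc, s)).1 = acc ++ pvRunA ls s := by
  induction ls generalizing acc s with
  | nil => simp [pvRunA]
  | cons l ls ih =>
    simp only [List.foldl_cons, pvRunA]
    by_cases hk : pvKeepHeader l = true
    · simp [pvStepA, hk, ih]
    · by_cases hh : pvIsHdr l = true
      · simp [pvStepA, hk, hh, ih]
      · cases s <;> simp [pvStepA, hk, hh, ih]

lemma pvFoldB (ls : List String) (done : List (List String)) (cur : List String) :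
    (ls.foldl pvStepB (done, cur)).1 ++ [(ls.foldl pvStepB (done, cur)).2] =
      done ++ (cur ++ (pvSecs ls).1) :: (pvSecs ls).2 := by
  induction ls generalizing done cur with
  | nil => simp [pvSecs]
  | cons l ls ih =>
    simp only [List.foldl_cons, pvSecs]
    by_cases hh : pvIsHdr l = true
    · simp [pvStepB, hh, ih]
    · simp [pvStepB, hh, ih]

-- the heart: A's scan emits exactly the preamble plus the kept sections
lemma pvRunA_eq_secs (ls : List String) :
    pvRunA ls false = (pvSecs ls).1 ++ ((pvSecs ls).2.filter pvKeepSec).flatten ∧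
    pvRunA ls true = ((pvSecs ls).2.filter pvKeepSec).flatten := by
  induction ls with
  | nil => simp [pvRunA, pvSecs]
  | cons l ls ih =>
    obtain ⟨ih1, ih2⟩ := ih
    simp only [pvRunA, pvSecs]
    by_cases hk : pvKeepHeader l = true
    · have hh := pvKeep_imp_header l hk
      constructor <;> simp [hk, hh, pvKeepSec, ih1]
    · by_cases hh : pvIsHdr l = true
      · constructor <;> simp [hk, hh, pvKeepSec, ih2]
      · constructor <;> simp [hk, hh, ih1, ih2]

-- ===== VERDICT (by name: the statement is the Claim_ definition above) =====
theorem filter_nonwebrtc_spec : Claim_equal_filter_nonwebrtc := by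
  intro commit _
  show filter_nonwebrtc commit = filter_nonwebrtc_alt commit
  -- the ports' inline lambdas are definitionally pvStepA / pvStepB
  show PySem.Str.join "\n"
      (((PySem.Str.split? commit "\n").getD []).foldl pvStepA ([], false)).1 =
    (let st := ((PySem.Str.split? commit "\n").getD []).foldl pvStepB ([], [])
     let sections := st.1 ++ [st.2]
     let kept := sections.take 1 ++ (sections.drop 1).filter pvKeepSec
     PySem.Str.join "\n" kept.flatten)
  set ls := (PySem.Str.split? commit "\n").getD [] with hls
  have hB := pvFoldB ls [] []
  simp only [List.nil_append] at hB
  simp only [hB]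
  congr 1
  rw [pvFoldA ls [] false, List.nil_append, (pvRunA_eq_secs ls).1]
  simp
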